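-- pv_equiv track=rewrite | github.com/amanjagga1/broadway-svg | utils.py | process_subsection_strings
-- ===== SOURCE A (Python) =====
-- def process_subsection_strings(strings):
--     processed_strings = []
--     for string in strings:
--         # Split by ' and ' first
--         parts = string.split(' and ')
--         temp_list = []
--         for part in parts:
--             # Split by ' / ' for each part resulting from the previous split
--             subparts = part.split('/')
--             # Trim whitespace from each subpart and add to the temporary list
--             temp_list.extend([subpart.strip() for subpart in subparts])
--         # Add trimmed parts to the processed strings list
--         processed_strings.extend(temp_list)
--
--     # Sort the list based on the number of tokens (words) in each string
--     processed_strings.sort(key=lambda s: len(s.split()))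
--
--     return processed_strings
-- ===== SOURCE B (Python) =====
-- # B: single-pass character scanner (state machine over each string) instead of nested
-- # library splits, and a bucket (counting) sort keyed by word count instead of a
-- # comparison sort; concatenating buckets in increasing key order preserves stability.
-- def process_subsection_strings(strings):
--     buckets = {}
--     for s in strings:
--         cur = []
--         i, n = 0, len(s)
--         while i < n:
--             if s.startswith(' and ', i):
--                 _emit(buckets, cur)
--                 cur = []
--                 i += 5
--             elif s[i] == '/':
--                 _emit(buckets, cur)
--                 cur = []
--                 i += 1
--             else:
--                 cur.append(s[i])
--                 i += 1
--         _emit(buckets, cur)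
--     out = []
--     for k in sorted(buckets):
--         out.extend(buckets[k])
--     return out
--
-- def _emit(buckets, chars):
--     tok = ''.join(chars).strip()
--     k = len(tok.split())
--     buckets.setdefault(k, []).append(tok)
-- ===== Notes on version B (the rewrite author's own statement) =====
-- stated objective: alternative
-- what changed: B tokenizes each string with a single-pass character scanner (a small state machine that recognizes ' and ' and '/' positions itself) instead of A's nested split(' and ')/split('/') passes with temp lists, and replaces A's comparison sort by a bucket sort: tokens are grouped into a dict keyed by word count as they are emitted and the buckets are concatenated in increasing key order, which reproduces the stable sort exactly.
import Mathlib
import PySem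

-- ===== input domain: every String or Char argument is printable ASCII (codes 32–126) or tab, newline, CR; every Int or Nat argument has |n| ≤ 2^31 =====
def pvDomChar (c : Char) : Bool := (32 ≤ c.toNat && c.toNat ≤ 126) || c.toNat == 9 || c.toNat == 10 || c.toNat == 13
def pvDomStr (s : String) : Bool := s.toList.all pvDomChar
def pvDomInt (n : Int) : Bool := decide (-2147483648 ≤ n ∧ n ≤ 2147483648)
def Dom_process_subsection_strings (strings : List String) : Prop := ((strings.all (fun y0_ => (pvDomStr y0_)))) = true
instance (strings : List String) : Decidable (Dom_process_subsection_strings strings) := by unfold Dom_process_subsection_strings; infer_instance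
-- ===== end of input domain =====

-- B replaces A's nested library splits by a single-pass character scanner and A's
-- comparison sort by a bucket sort keyed on word count (objective: alternative).

-- ===== PORT A =====
def process_subsection_strings (strings : List String) : List String :=
  let processed_strings := strings.foldl (fun processed string =>
    -- parts = string.split(' and ')
    let parts := PySem.Chars.splitOn string.toList " and ".toList
    let temp_list := parts.foldl (fun temp part =>
      -- subparts = part.split('/');  temp_list.extend(strip each)
      let subparts := PySem.Chars.splitOn part "/".toList
      temp ++ subparts.map (fun sub => String.ofList (PySem.Chars.strip sub))) []
    processed ++ temp_list) []
  PySem.List.sorted processed_strings (fun s => (PySem.Chars.split₀ s.toList).length)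

-- ===== PORT B =====
-- _emit: tok = ''.join(chars).strip(); buckets[len(tok.split())] = buckets.get(k, []) + [tok]
def pvWc (tok : String) : Nat := (PySem.Chars.split₀ tok.toList).length

def pvEmit (buckets : PySem.Dict Nat (List String)) (chars : List Char) :
    PySem.Dict Nat (List String) :=
  let tok := String.ofList (PySem.Chars.strip chars)
  buckets.modify (pvWc tok) [] (· ++ [tok])

-- the while-loop over the characters of one string (index i ↦ remaining suffix)
def pvScan (buckets : PySem.Dict Nat (List String)) (cur : List Char) :
    List Char → PySem.Dict Nat (List String)
  | [] => pvEmit buckets cur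
  | c :: t =>
    if (" and ".toList).isPrefixOf (c :: t) then
      pvScan (pvEmit buckets cur) [] (t.drop 4)      -- i += 5
    else if c = '/' then
      pvScan (pvEmit buckets cur) [] t               -- i += 1
    else
      pvScan buckets (cur ++ [c]) t                  -- cur.append(s[i]); i += 1
termination_by l => l.length
decreasing_by
  · simp only [List.length_drop, List.length_cons]; omega
  · simp
  · simp

def process_subsection_strings_alt (strings : List String) : List String :=
  let buckets := strings.foldl (fun d s => pvScan d [] s.toList) PySem.Dict.empty
  (PySem.List.sorted buckets.keys (fun k => k) false).flatMap (fun k => buckets.getD k [])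

-- ===== PRECONDITION & SPEC =====
def Spec_process_subsection_strings (strings : List String) (out : List String) : Prop :=
  out = process_subsection_strings_alt strings
instance (strings : List String) (out : List String) :
    Decidable (Spec_process_subsection_strings strings out) := by
  unfold Spec_process_subsection_strings; infer_instance

-- ===== CLAIM (what is proved, stated in full; the proofs are below) =====
def Claim_equal_process_subsection_strings : Prop :=
  ∀ (strings : List String), Dom_process_subsection_strings strings →
    Spec_process_subsection_strings strings (process_subsection_strings strings)

-- ===== LEMMAS AND PROOFS =====

-- prepend `pre` to the head of a list of lists
def modHd (pre : List Char) : List (List Char) → List (List Char)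
  | [] => [pre]
  | x :: xs => (pre ++ x) :: xs

-- accumulator-free form of PySem.Chars.splitOn (for nonempty sep)
def splitP (sep : List Char) : List Char → List (List Char)
  | [] => [[]]
  | c :: t =>
    if sep.isPrefixOf (c :: t) && !sep.isEmpty then
      [] :: splitP sep (List.drop sep.length (c :: t))
    else
      modHd [c] (splitP sep t)
termination_by l => l.length
decreasing_by
  · rename_i h
    simp only [Bool.and_eq_true, Bool.not_eq_true', List.isEmpty_eq_false_iff] at h
    have : 1 ≤ sep.length := by cases sep with | nil => exact absurd rfl h.2 | cons a b => simp
    simp only [List.length_drop, List.length_cons]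
    omega
  · simp

-- accumulator-free form of pvScan's token stream
def scanToks : List Char → List (List Char)
  | [] => [[]]
  | c :: t =>
    if (" and ".toList).isPrefixOf (c :: t) then
      [] :: scanToks (t.drop 4)
    else if c = '/' then
      [] :: scanToks t
    else
      modHd [c] (scanToks t)
termination_by l => l.length
decreasing_by
  · simp only [List.length_drop, List.length_cons]; omega
  · simp
  · simp

theorem splitP_cons (sep : List Char) (c : Char) (t : List Char) :
    splitP sep (c :: t)
      = if sep.isPrefixOf (c :: t) && !sep.isEmpty then
          [] :: splitP sep (List.drop sep.length (c :: t))
        else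
          modHd [c] (splitP sep t) := by
  rw [splitP]

theorem scanToks_cons (c : Char) (t : List Char) :
    scanToks (c :: t)
      = if (" and ".toList).isPrefixOf (c :: t) then
          [] :: scanToks (t.drop 4)
        else if c = '/' then
          [] :: scanToks t
        else
          modHd [c] (scanToks t) := by
  rw [scanToks]

theorem modHd_modHd (p q : List Char) (ys : List (List Char)) :
    modHd p (modHd q ys) = modHd (p ++ q) ys := by
  cases ys <;> simp [modHd]

theorem splitP_ne_nil (sep l : List Char) : splitP sep l ≠ [] := by
  cases l with
  | nil => simp [splitP]
  | cons c t =>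
    rw [splitP_cons]
    split
    · simp
    · cases h : splitP sep t <;> simp [modHd]

theorem scanToks_ne_nil (l : List Char) : scanToks l ≠ [] := by
  cases l with
  | nil => simp [scanToks]
  | cons c t =>
    rw [scanToks_cons]
    split
    · simp
    · split
      · simp
      · cases h : scanToks t <;> simp [modHd]

theorem modHd_nil_splitP (sep l : List Char) : modHd [] (splitP sep l) = splitP sep l := by
  cases h : splitP sep l with
  | nil => exact absurd h (splitP_ne_nil sep l)
  | cons x xs => simp [modHd]

theorem modHd_nil_scanToks (l : List Char) : modHd [] (scanToks l) = scanToks l := by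
  cases h : scanToks l with
  | nil => exact absurd h (scanToks_ne_nil l)
  | cons x xs => simp [modHd]

theorem modHd_append (p : List Char) (as bs : List (List Char)) (h : as ≠ []) :
    modHd p as ++ bs = modHd p (as ++ bs) := by
  cases as with
  | nil => exact absurd rfl h
  | cons x xs => simp [modHd]

theorem splitOn_go_spec (sep : List Char) (hsep : sep ≠ []) :
    ∀ fuel l cur acc, l.length < fuel →
      PySem.Chars.splitOn.go sep fuel l cur acc
        = acc.reverse ++ modHd cur.reverse (splitP sep l) := by
  intro fuel
  induction fuel with
  | zero => intro l cur acc h; omega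
  | succ fuel ih =>
    intro l cur acc h
    cases l with
    | nil =>
      simp [PySem.Chars.splitOn.go, splitP, modHd]
    | cons c t =>
      rw [PySem.Chars.splitOn.go, splitP_cons]
      by_cases hp : sep.isPrefixOf (c :: t)
      · have hlen : 1 ≤ sep.length := by
          cases sep with
          | nil => exact absurd rfl hsep
          | cons _ _ => simp
        rw [if_pos hp, if_pos (by simp [hp, hsep])]
        rw [ih _ _ _ (by simp at h ⊢; omega)]
        simp only [List.reverse_nil, modHd_nil_splitP]
        simp [modHd]
      · rw [if_neg hp, if_neg (by simp [hp])]
        rw [ih _ _ _ (by simp at h ⊢; omega)]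
        have hrev : (c :: cur).reverse = cur.reverse ++ [c] := by simp
        rw [hrev, ← modHd_modHd]

theorem splitOn_eq_splitP (s sep : List Char) (hsep : sep ≠ []) :
    PySem.Chars.splitOn s sep = splitP sep s := by
  rw [PySem.Chars.splitOn, splitOn_go_spec sep hsep _ _ _ _ (by omega)]
  simp only [List.reverse_nil, modHd_nil_splitP, List.nil_append]

-- the fusion: the one-pass scanner's tokens = nested split on ' and ' then '/'
theorem scanToks_fusion (s : List Char) :
    scanToks s = (splitP " and ".toList s).flatMap (splitP ['/']) := by
  have hand : " and ".toList = [' ', 'a', 'n', 'd', ' '] := rfl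
  induction hn : s.length using Nat.strong_induction_on generalizing s with
  | _ n ih =>
  subst hn
  cases s with
  | nil => simp [splitP, scanToks]
  | cons c t =>
    rw [scanToks_cons, hand, splitP_cons [' ', 'a', 'n', 'd', ' '] c t]
    by_cases hA : ([' ', 'a', 'n', 'd', ' ']).isPrefixOf (c :: t)
    · rw [if_pos hA, if_pos (by rw [hA]; decide)]
      simp only [List.flatMap_cons, List.length_cons, List.length_nil, List.drop_succ_cons]
      rw [ih _ (by simp only [List.length_drop, List.length_cons]; omega) _ rfl]
      simp [splitP]
    · have hA' : ([' ', 'a', 'n', 'd', ' '].isPrefixOf (c :: t)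
          && !([' ', 'a', 'n', 'd', ' '].isEmpty)) = false := by simp [hA]
      rw [if_neg hA, hA']
      simp only [Bool.false_eq_true, if_false]
      obtain ⟨x, xs, hx⟩ : ∃ x xs, splitP [' ', 'a', 'n', 'd', ' '] t = x :: xs := by
        cases h' : splitP [' ', 'a', 'n', 'd', ' '] t with
        | nil => exact absurd h' (splitP_ne_nil _ _)
        | cons x xs => exact ⟨x, xs, rfl⟩
      have iht := ih t.length (by simp) t rfl
      rw [hand, hx] at iht
      simp only [List.flatMap_cons] at iht
      rw [hx, modHd]
      simp only [List.flatMap_cons]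
      by_cases hc : c = '/'
      · subst hc
        rw [if_pos rfl]
        simp only [List.singleton_append]
        rw [splitP_cons ['/'] '/']
        rw [if_pos (by simp [List.isPrefixOf])]
        simp only [List.length_cons, List.length_nil, List.drop_succ_cons, List.drop_zero]
        rw [iht]
        simp
      · rw [if_neg hc]
        simp only [List.singleton_append]
        rw [splitP_cons ['/'] c]
        rw [if_neg (by simp [List.isPrefixOf]; exact fun h => hc h.symm)]
        rw [iht]
        rw [modHd_append _ _ _ (splitP_ne_nil _ _)]

-- pvScan in terms of the token stream
theorem pvScan_spec (l : List Char) :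
    ∀ (d : PySem.Dict Nat (List String)) (cur : List Char),
      pvScan d cur l = (modHd cur (scanToks l)).foldl pvEmit d := by
  induction hn : l.length using Nat.strong_induction_on generalizing l with
  | _ n ih =>
  subst hn
  intro d cur
  cases l with
  | nil => simp [pvScan, scanToks, modHd]
  | cons c t =>
    rw [pvScan, scanToks_cons]
    by_cases hA : (" and ".toList).isPrefixOf (c :: t)
    · rw [if_pos hA, if_pos hA]
      rw [ih _ (by simp only [List.length_drop, List.length_cons]; omega) _ rfl]
      rw [modHd_nil_scanToks]
      simp [modHd]
    · rw [if_neg hA, if_neg hA]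
      by_cases hc : c = '/'
      · subst hc
        rw [if_pos rfl, if_pos rfl]
        rw [ih _ (by simp) _ rfl, modHd_nil_scanToks]
        simp [modHd]
      · rw [if_neg hc, if_neg hc]
        rw [ih _ (by simp) _ rfl, modHd_modHd]

-- ===== bucket sort = Python's stable sort =====

-- insert into a strictly increasing list of keys, no duplication
def insSorted (m : Nat) : List Nat → List Nat
  | [] => [m]
  | k :: ks => if m < k then m :: k :: ks else if m = k then k :: ks else k :: insSorted m ks

theorem insertBy_nil (p : String → String → Bool) (x : String) :
    PySem.List.insertBy p x [] = [x] := rfl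

theorem insertBy_cons (p : String → String → Bool) (x y : String) (ys : List String) :
    PySem.List.insertBy p x (y :: ys)
      = if p x y then x :: y :: ys else y :: PySem.List.insertBy p x ys := rfl

theorem insertBy_append_of_forall_false (p : String → String → Bool) (x : String)
    (as bs : List String) (h : ∀ a ∈ as, p x a = false) :
    PySem.List.insertBy p x (as ++ bs) = as ++ PySem.List.insertBy p x bs := by
  induction as with
  | nil => simp
  | cons a as iha =>
    rw [List.cons_append, insertBy_cons, if_neg (by simp [h a (by simp)])]
    rw [iha (fun a' ha' => h a' (by simp [ha']))]
    simp

theorem insertBy_of_forall_true (p : String → String → Bool) (x : String)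
    (bs : List String) (h : ∀ b ∈ bs, p x b = true) :
    PySem.List.insertBy p x bs = x :: bs := by
  cases bs with
  | nil => rfl
  | cons b bs => rw [insertBy_cons, if_pos (h b (by simp))]

theorem insertBy_flatMap (key : String → Nat) (x : String) :
    ∀ (ks : List Nat) (B : Nat → List String),
      ks.Pairwise (· < ·) →
      (∀ k ∈ ks, ∀ t ∈ B k, key t = k) →
      (key x ∉ ks → B (key x) = []) →
      PySem.List.insertBy (fun a b => decide (key a < key b)) x (ks.flatMap B)
        = (insSorted (key x) ks).flatMap (fun k => B k ++ if k = key x then [x] else []) := by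
  intro ks
  induction ks with
  | nil =>
    intro B _ _ hBx
    simp [insSorted, insertBy_nil, hBx (by simp)]
  | cons k ks ihk =>
    intro B hinc hB hBx
    have hgt : ∀ k' ∈ ks, k < k' := fun k' hk' => (List.pairwise_cons.mp hinc).1 k' hk'
    rw [insSorted]
    rcases lt_trichotomy (key x) k with hlt | heq | hgt'
    · rw [if_pos hlt]
      have hall : ∀ b ∈ (k :: ks).flatMap B, (fun a b => decide (key a < key b)) x b = true := by
        intro b hb
        simp only [List.mem_flatMap] at hb
        obtain ⟨k', hk', hbk'⟩ := hb
        have : key b = k' := hB k' hk' b hbk'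
        have : k ≤ k' := by
          rcases List.mem_cons.mp hk' with h | h
          · omega
          · exact le_of_lt (hgt _ h)
        simp only [decide_eq_true_eq]
        omega
      rw [insertBy_of_forall_true _ _ _ hall]
      have hnx : key x ∉ k :: ks := by
        intro hmem
        rcases List.mem_cons.mp hmem with h | h
        · omega
        · have := hgt _ h; omega
      simp only [List.flatMap_cons, hBx hnx, List.nil_append, if_true]
      rw [if_neg (show ¬ k = key x by omega)]
      simp only [List.append_nil, List.singleton_append, List.cons.injEq, true_and,
        List.append_cancel_left_eq]
      apply List.flatMap_congr
      intro k' hk'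
      rw [if_neg (by have := hgt _ hk'; omega)]
      simp
    · rw [if_neg (by omega), if_pos heq]
      simp only [List.flatMap_cons]
      have hfalse : ∀ a ∈ B k, (fun a b => decide (key a < key b)) x a = false := by
        intro a ha
        have : key a = k := hB k (by simp) a ha
        simp only [decide_eq_false_iff_not]
        omega
      rw [insertBy_append_of_forall_false _ _ _ _ hfalse]
      have hall : ∀ b ∈ ks.flatMap B, (fun a b => decide (key a < key b)) x b = true := by
        intro b hb
        simp only [List.mem_flatMap] at hb
        obtain ⟨k', hk', hbk'⟩ := hb
        have : key b = k' := hB k' (by simp [hk']) b hbk'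
        have := hgt _ hk'
        simp only [decide_eq_true_eq]
        omega
      rw [insertBy_of_forall_true _ _ _ hall]
      rw [if_pos heq.symm]
      simp only [List.append_assoc, List.cons_append,
        List.append_cancel_left_eq, List.cons.injEq, true_and]
      apply List.flatMap_congr
      intro k' hk'
      rw [if_neg (by have := hgt _ hk'; omega)]
      simp
    · rw [if_neg (by omega), if_neg (by omega)]
      simp only [List.flatMap_cons]
      have hfalse : ∀ a ∈ B k, (fun a b => decide (key a < key b)) x a = false := by
        intro a ha
        have : key a = k := hB k (by simp) a ha
        simp only [decide_eq_false_iff_not]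
        omega
      rw [insertBy_append_of_forall_false _ _ _ _ hfalse]
      rw [ihk B (List.pairwise_cons.mp hinc).2 (fun k' hk' => hB k' (by simp [hk']))
          (fun hnx => hBx (by intro hm; rcases List.mem_cons.mp hm with h | h
                              · omega
                              · exact hnx h))]
      rw [if_neg (by omega)]
      simp

theorem mem_insSorted (m : Nat) (zs : List Nat) (y : Nat) :
    y ∈ insSorted m zs ↔ y = m ∨ y ∈ zs := by
  induction zs with
  | nil => simp [insSorted]
  | cons k ks ihk =>
    rw [insSorted]
    split
    · simp
    · split
      · rename_i h1 h2
        subst h2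
        simp only [List.mem_cons]
        tauto
      · simp only [List.mem_cons, ihk]
        tauto

theorem insSorted_pairwise (m : Nat) (zs : List Nat) (h : zs.Pairwise (· < ·)) :
    (insSorted m zs).Pairwise (· < ·) := by
  induction zs with
  | nil => simp [insSorted]
  | cons k ks ihk =>
    rw [insSorted]
    rcases lt_trichotomy m k with hlt | heq | hgt
    · rw [if_pos hlt]
      refine List.pairwise_cons.mpr ⟨?_, h⟩
      intro k' hk'
      rcases List.mem_cons.mp hk' with h' | h'
      · omega
      · have := (List.pairwise_cons.mp h).1 k' h'; omega
    · rw [if_neg (by omega), if_pos heq]; exact h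
    · rw [if_neg (by omega), if_neg (by omega)]
      refine List.pairwise_cons.mpr ⟨?_, ihk (List.pairwise_cons.mp h).2⟩
      intro k' hk'
      rcases (mem_insSorted m ks k').mp hk' with h' | h'
      · omega
      · exact (List.pairwise_cons.mp h).1 k' h'

theorem insSorted_of_mem (m : Nat) (zs : List Nat) (hp : zs.Pairwise (· < ·)) (h : m ∈ zs) :
    insSorted m zs = zs := by
  induction zs with
  | nil => simp at h
  | cons k ks ihk =>
    rw [insSorted]
    rcases List.mem_cons.mp h with h' | h'
    · rw [if_neg (by omega), if_pos h']
    · have : k < m := (List.pairwise_cons.mp hp).1 m h'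
      rw [if_neg (by omega), if_neg (by omega), ihk (List.pairwise_cons.mp hp).2 h']

theorem insSorted_perm_of_not_mem (m : Nat) (zs : List Nat) (h : m ∉ zs) :
    (insSorted m zs).Perm (m :: zs) := by
  induction zs with
  | nil => simp [insSorted]
  | cons k ks ihk =>
    rw [insSorted]
    split
    · exact List.Perm.refl _
    · split
      · exact absurd (by rename_i h2; simp [h2]) h
      · refine List.Perm.trans (List.Perm.cons k (ihk (fun hm => h (by simp [hm])))) ?_
        exact List.Perm.swap m k ks

-- stable sort = buckets in increasing key order
theorem sorted_snoc (key : String → Nat) (l : List String) (x : String) :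
    PySem.List.sorted (l ++ [x]) key false
      = PySem.List.insertBy (fun a b => decide (key a < key b)) x
          (PySem.List.sorted l key false) := by
  rw [PySem.List.sorted_eq_foldl_insertBy, PySem.List.sorted_eq_foldl_insertBy,
    List.foldl_append]
  rfl

theorem sk_snoc (key : String → Nat) (l : List String) (x : String) :
    PySem.List.sorted (PySem.Set.ofList ((l ++ [x]).map key)) (fun k => k) false
      = insSorted (key x)
          (PySem.List.sorted (PySem.Set.ofList (l.map key)) (fun k => k) false) := by
  have hpw : (PySem.List.sorted (PySem.Set.ofList (l.map key)) (fun k => k) false).Pairwise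
      (· < ·) := PySem.List.sorted_ofList_pairwise_lt _
  apply PySem.List.sorted_eq_of_perm_of_pairwise_lt
  · -- the permutation
    rw [List.map_append, List.map_singleton, PySem.Set.ofList_append_singleton]
    by_cases hm : key x ∈ PySem.Set.ofList (l.map key)
    · rw [PySem.Set.add_of_mem hm]
      rw [insSorted_of_mem _ _ hpw (by
        rw [PySem.List.mem_sorted]; exact hm)]
      exact PySem.List.sorted_perm _ _ _
    · rw [PySem.Set.add_of_not_mem hm]
      refine List.Perm.trans (insSorted_perm_of_not_mem _ _ (by
        rw [PySem.List.mem_sorted]; exact hm)) ?_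
      refine List.Perm.trans (List.Perm.cons _ (PySem.List.sorted_perm _ _ _)) ?_
      exact (List.perm_append_singleton _ _).symm
  · -- strictly increasing
    exact insSorted_pairwise _ _ hpw

theorem bucket_sort (key : String → Nat) (l : List String) :
    PySem.List.sorted l key false
      = (PySem.List.sorted (PySem.Set.ofList (l.map key)) (fun k => k) false).flatMap
          (fun k => l.filter (fun t => key t == k)) := by
  induction l using List.reverseRecOn with
  | nil => rfl
  | append_singleton l x ih =>
    rw [sorted_snoc, ih, sk_snoc]
    rw [insertBy_flatMap key x _ (fun k => l.filter (fun t => key t == k))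
      (PySem.List.sorted_ofList_pairwise_lt _)
      (by
        intro k _ t ht
        have := (List.mem_filter.mp ht).2
        exact Nat.eq_of_beq_eq_true (by simpa using this))
      (by
        intro hnx
        rw [PySem.List.mem_sorted, PySem.Set.mem_ofList] at hnx
        rw [List.filter_eq_nil_iff]
        intro t ht hbeq
        exact hnx (by
          have : key t = key x := Nat.eq_of_beq_eq_true (by simpa using hbeq)
          exact this ▸ List.mem_map_of_mem ht))]
    apply List.flatMap_congr
    intro k _
    rw [List.filter_append]
    congr 1
    by_cases h : k = key x
    · subst h
      simp
    · rw [if_neg h]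
      simp only [List.filter_cons, List.filter_nil]
      rw [if_neg (by simp; omega)]

-- one string's contribution to A's list = one string's scanner tokens, stripped
theorem per_string (s : String) :
    (PySem.Chars.splitOn s.toList " and ".toList).foldl (fun temp part =>
        temp ++ (PySem.Chars.splitOn part "/".toList).map
          (fun sub => String.ofList (PySem.Chars.strip sub))) []
      = (scanToks s.toList).map (fun t => String.ofList (PySem.Chars.strip t)) := by
  rw [PySem.List.foldl_append_eq_flatMap]
  have hs : "/".toList = ['/'] := rfl
  rw [splitOn_eq_splitP _ _ (by decide)]
  simp only [hs, splitOn_eq_splitP _ ['/'] (by decide), List.nil_append]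
  rw [scanToks_fusion, List.map_flatMap]

-- fold a fold over a flatMap
theorem foldl_flatMap_fold {α β γ : Type} (l : List α) (f : α → List β)
    (g : γ → β → γ) (init : γ) :
    l.foldl (fun acc a => (f a).foldl g acc) init = (l.flatMap f).foldl g init := by
  induction l generalizing init with
  | nil => rfl
  | cons a l ihl => simp only [List.foldl_cons, List.flatMap_cons, List.foldl_append, ihl]

-- B's bucket dict, as a fold over the flattened token list
theorem buckets_eq (strings : List String) :
    strings.foldl (fun d s => pvScan d [] s.toList) PySem.Dict.empty
      = (strings.flatMap (fun s =>
            (scanToks s.toList).map (fun t => String.ofList (PySem.Chars.strip t)))).foldl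
          (fun d tok => d.modify (pvWc tok) [] (· ++ [tok])) PySem.Dict.empty := by
  have h1 : ∀ (d : PySem.Dict Nat (List String)) (s : String),
      pvScan d [] s.toList = (scanToks s.toList).foldl pvEmit d := by
    intro d s
    rw [pvScan_spec, modHd_nil_scanToks]
  simp only [h1]
  rw [foldl_flatMap_fold]
  rw [← List.map_flatMap, List.foldl_map]
  rfl

theorem process_eq (strings : List String) :
    process_subsection_strings strings
      = PySem.List.sorted
          (strings.flatMap (fun s =>
            (scanToks s.toList).map (fun t => String.ofList (PySem.Chars.strip t))))
          pvWc false := by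
  unfold process_subsection_strings
  rw [PySem.List.foldl_append_eq_flatMap]
  simp only [List.nil_append, per_string]
  rfl

theorem alt_eq (strings : List String) :
    process_subsection_strings_alt strings
      = PySem.List.sorted
          (strings.flatMap (fun s =>
            (scanToks s.toList).map (fun t => String.ofList (PySem.Chars.strip t))))
          pvWc false := by
  unfold process_subsection_strings_alt
  rw [buckets_eq]
  set T := strings.flatMap (fun s =>
    (scanToks s.toList).map (fun t => String.ofList (PySem.Chars.strip t))) with hT
  have hkeys : (T.foldl (fun d tok => d.modify (pvWc tok) [] (· ++ [tok]))
      PySem.Dict.empty).keys = PySem.Set.ofList (T.map pvWc) := by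
    rw [PySem.Dict.keys_foldl_modify_key]
    simp [PySem.Set.update_nil_left]
  have hpair : T.foldl (fun d tok => d.modify (pvWc tok) [] (· ++ [tok])) PySem.Dict.empty
      = (T.map (fun t => (pvWc t, t))).foldl
          (fun d p => d.modify p.1 [] (· ++ [p.2])) PySem.Dict.empty := by
    rw [List.foldl_map]
  have hgetD : ∀ k, (T.foldl (fun d tok => d.modify (pvWc tok) [] (· ++ [tok]))
      PySem.Dict.empty).getD k [] = T.filter (fun t => pvWc t == k) := by
    intro k
    rw [hpair, PySem.Dict.getD_foldl_modify_append]
    rw [List.filter_map]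
    simp [Function.comp_def]
  simp only [hkeys, hgetD]
  exact (bucket_sort pvWc T).symm

-- ===== VERDICT (by name: the statement is the Claim_ definition above) =====
theorem process_subsection_strings_spec : Claim_equal_process_subsection_strings := by
  intro strings _
  unfold Spec_process_subsection_strings
  rw [process_eq, alt_eq]
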